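-- pv_equiv track=rewrite | github.com/Baguette-bbang/coding-test | BaekJoon/9000/9205.py | can_reach_festival
-- ===== SOURCE A (Python) =====
-- from collections import deque
--
-- def can_reach_festival(hx, hy, cs, fx, fy):
--     queue = deque([(hx, hy, 20)])  # (x, y, remaining_beers)
--     visited = set([(hx, hy)])
--
--     while queue:
--         x, y, beers = queue.popleft()
--
--         # 페스티벌에 도착할 수 있다면
--         if abs(x - fx) + abs(y - fy) <= beers * 50:
--             return "happy"
--
--         for cx, cy in cs:
--             if (cx, cy) not in visited and abs(x - cx) + abs(y - cy) <= beers * 50: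
--                 queue.append((cx, cy, 20))  # 편의점에서 맥주를 새로 채움
--                 visited.add((cx, cy))
--
--     return "sad"
-- ===== SOURCE B (Python) =====
-- def can_reach_festival(hx, hy, cs, fx, fy):
--     # Union-find by relabeling over the distinct nodes [home] + stores + [festival]:
--     # merge the components of every pair within Manhattan distance 1000, then
--     # compare the component labels of home and festival.
--     comp = {}
--     for p in [(hx, hy)] + cs + [(fx, fy)]:
--         if p not in comp:
--             comp[p] = p
--     pts = list(comp)
--     for a in pts:
--         for b in pts:
--             if abs(a[0] - b[0]) + abs(a[1] - b[1]) <= 1000 and comp[a] != comp[b]: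
--                 ca, cb = comp[a], comp[b]
--                 comp = {p: (ca if c == cb else c) for p, c in comp.items()}
--     return "happy" if comp[(hx, hy)] == comp[(fx, fy)] else "sad"
-- ===== Notes on version B (the rewrite author's own statement) =====
-- stated objective: alternative
-- what changed: Replaces the BFS with a queue and visited set by a union-find (disjoint-set components maintained by relabeling) over the deduplicated node set [home]+stores+[festival]: every pair within Manhattan distance 1000 is unioned and the answer compares the component labels of home and festival.
import Mathlib
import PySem

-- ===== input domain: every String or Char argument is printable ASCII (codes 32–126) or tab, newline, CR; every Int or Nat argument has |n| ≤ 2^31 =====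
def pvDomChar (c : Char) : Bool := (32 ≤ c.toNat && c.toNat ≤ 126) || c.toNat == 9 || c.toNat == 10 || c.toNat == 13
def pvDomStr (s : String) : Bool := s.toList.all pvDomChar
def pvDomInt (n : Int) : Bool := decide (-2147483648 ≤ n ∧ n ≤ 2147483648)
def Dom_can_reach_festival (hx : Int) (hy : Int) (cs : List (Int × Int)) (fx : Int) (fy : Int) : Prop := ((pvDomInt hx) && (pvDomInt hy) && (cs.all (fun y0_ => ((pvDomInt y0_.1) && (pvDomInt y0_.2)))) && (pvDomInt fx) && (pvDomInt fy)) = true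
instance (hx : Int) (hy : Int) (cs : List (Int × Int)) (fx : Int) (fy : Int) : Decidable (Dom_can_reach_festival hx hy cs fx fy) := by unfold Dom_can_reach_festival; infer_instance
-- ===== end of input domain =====

-- B replaces A's BFS (queue + visited set) by a union-find maintained by relabeling over
-- the distinct nodes [home] + stores + [festival]; objective: alternative (same answers, different algorithm).

-- ===== PORT A =====
-- number of distinct store coordinates not yet visited (termination measure helper)
def pvUnvis (cs : List (Int × Int)) (v : PySem.Set (Int × Int)) : Nat :=
  ((PySem.List.dedup cs).filter (fun c => !(PySem.Set.contains v c))).length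

-- the body of A's 'for cx, cy in cs' loop, threading (queue, visited)
def pvBfsStep (x y beers : Int) (cs : List (Int × Int))
    (st : List (Int × Int × Int) × PySem.Set (Int × Int)) :
    List (Int × Int × Int) × PySem.Set (Int × Int) :=
  cs.foldl (fun s c =>
    if c ∉ s.2 ∧ |x - c.1| + |y - c.2| ≤ beers * 50 then
      (s.1 ++ [(c.1, c.2, 20)], PySem.Set.add s.2 c)
    else s) st

lemma pvUnvis_add_lt (cs : List (Int × Int)) (v : PySem.Set (Int × Int)) (c : Int × Int)
    (hc : c ∈ cs) (hv : c ∉ v) : pvUnvis cs (PySem.Set.add v c) < pvUnvis cs v := by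
  unfold pvUnvis
  have hfe : (PySem.List.dedup cs).filter (fun x => !(PySem.Set.contains (PySem.Set.add v c) x))
      = ((PySem.List.dedup cs).filter (fun x => !(PySem.Set.contains v x))).filter (fun x => !(x == c)) := by
    rw [List.filter_filter]
    apply List.filter_congr
    intro x _
    by_cases hxc : x = c
    · subst hxc
      simp [PySem.Set.mem_add]
    · simp [PySem.Set.mem_add, hxc]
  rw [hfe]
  apply List.length_filter_lt_length_iff_exists.mpr
  refine ⟨c, ?_, by simp⟩
  simp [List.mem_filter, hc, hv]

lemma pvBfsStep_measure (x y beers : Int) (cs : List (Int × Int)) (l : List (Int × Int))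
    (hl : ∀ c ∈ l, c ∈ cs) :
    ∀ (q : List (Int × Int × Int)) (v : PySem.Set (Int × Int)),
      (l.foldl (fun s c =>
        if c ∉ s.2 ∧ |x - c.1| + |y - c.2| ≤ beers * 50 then
          (s.1 ++ [(c.1, c.2, 20)], PySem.Set.add s.2 c)
        else s) (q, v)).1.length
      + pvUnvis cs (l.foldl (fun s c =>
        if c ∉ s.2 ∧ |x - c.1| + |y - c.2| ≤ beers * 50 then
          (s.1 ++ [(c.1, c.2, 20)], PySem.Set.add s.2 c)
        else s) (q, v)).2
      ≤ q.length + pvUnvis cs v := by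
  induction l with
  | nil => intro q v; simp
  | cons c t ih =>
    intro q v
    have hc : c ∈ cs := hl c (by simp)
    have ht : ∀ c ∈ t, c ∈ cs := fun c hmem => hl c (by simp [hmem])
    simp only [List.foldl_cons]
    split_ifs with h
    · have h1 := ih ht (q ++ [(c.1, c.2, 20)]) (PySem.Set.add v c)
      have h2 := pvUnvis_add_lt cs v c hc h.1
      simp at h1 ⊢
      omega
    · exact ih ht q v

def pvBfsLoop (cs : List (Int × Int)) (fx fy : Int)
    (queue : List (Int × Int × Int)) (visited : PySem.Set (Int × Int)) : String :=
  match queue with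
  | [] => "sad"
  | (x, y, beers) :: rest =>
    if |x - fx| + |y - fy| ≤ beers * 50 then "happy"
    else
      let st := pvBfsStep x y beers cs (rest, visited)
      pvBfsLoop cs fx fy st.1 st.2
termination_by queue.length + pvUnvis cs visited
decreasing_by
  have := pvBfsStep_measure x y beers cs cs (fun _ h => h) rest visited
  simp only [pvBfsStep, List.length_cons]
  omega

def can_reach_festival (hx : Int) (hy : Int) (cs : List (Int × Int)) (fx : Int) (fy : Int) : String :=
  pvBfsLoop cs fx fy [(hx, hy, 20)] (PySem.Set.ofList [(hx, hy)])

-- ===== PORT B =====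
-- comp = {p: (ca if c == cb else c) for p, c in comp.items()}
def pvRelabel (c : PySem.Dict (Int × Int) (Int × Int)) (ca cb : Int × Int) :
    PySem.Dict (Int × Int) (Int × Int) :=
  PySem.Dict.mk (c.items.map (fun pc => (pc.1, if pc.2 = cb then ca else pc.2)))

-- one iteration of the inner 'for b in pts' loop
def pvUnionStep (a b : Int × Int) (c : PySem.Dict (Int × Int) (Int × Int)) :
    PySem.Dict (Int × Int) (Int × Int) :=
  if |a.1 - b.1| + |a.2 - b.2| ≤ 1000 ∧ c.getD a a ≠ c.getD b b then
    pvRelabel c (c.getD a a) (c.getD b b)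
  else c

def can_reach_festival_alt (hx : Int) (hy : Int) (cs : List (Int × Int)) (fx : Int) (fy : Int) : String :=
  let nodes := ((hx, hy) :: cs) ++ [(fx, fy)]
  -- comp[p] = p for every fresh p, in order (keys always present below, so getD is exact for comp[...])
  let comp0 := nodes.foldl (fun d p => if d.contains p then d else d.insert p p)
      (PySem.Dict.empty : PySem.Dict (Int × Int) (Int × Int))
  let pts := comp0.keys
  let comp := pts.foldl (fun c a => pts.foldl (fun c b => pvUnionStep a b c) c) comp0
  if comp.getD (hx, hy) (hx, hy) = comp.getD (fx, fy) (fx, fy) then "happy" else "sad"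

-- ===== PRECONDITION & SPEC =====
def Spec_can_reach_festival (hx : Int) (hy : Int) (cs : List (Int × Int)) (fx : Int) (fy : Int) (out : String) : Prop := out = can_reach_festival_alt hx hy cs fx fy
instance (hx : Int) (hy : Int) (cs : List (Int × Int)) (fx : Int) (fy : Int) (out : String) : Decidable (Spec_can_reach_festival hx hy cs fx fy out) := by unfold Spec_can_reach_festival; infer_instance

-- ===== CLAIM (what is proved, stated in full; the proofs are below) =====
def Claim_equal_can_reach_festival : Prop := ∀ (hx : Int) (hy : Int) (cs : List (Int × Int)) (fx : Int) (fy : Int), Dom_can_reach_festival hx hy cs fx fy → Spec_can_reach_festival hx hy cs fx fy (can_reach_festival hx hy cs fx fy)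

-- ===== LEMMAS AND PROOFS =====

-- Abstract descriptions: A-side reachability and the undirected near-graph on all nodes.
def pvStep (cs : List (Int × Int)) (a b : Int × Int) : Prop :=
  b ∈ cs ∧ |a.1 - b.1| + |a.2 - b.2| ≤ 1000

def pvAHappy (cs : List (Int × Int)) (home fest : Int × Int) : Prop :=
  ∃ p, Relation.ReflTransGen (pvStep cs) home p ∧ |p.1 - fest.1| + |p.2 - fest.2| ≤ 1000

def pvEdge (L : List (Int × Int)) (a b : Int × Int) : Prop :=
  a ∈ L ∧ b ∈ L ∧ |a.1 - b.1| + |a.2 - b.2| ≤ 1000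

def pvConn (L : List (Int × Int)) (a b : Int × Int) : Prop := Relation.EqvGen (pvEdge L) a b

-- ---- A-side: fold characterizations of pvBfsStep ----
lemma step_mem_snd (x y beers : Int) (l : List (Int × Int)) :
    ∀ (q : List (Int × Int × Int)) (v : PySem.Set (Int × Int)) (z : Int × Int),
      (z ∈ (pvBfsStep x y beers l (q, v)).2 ↔
        z ∈ v ∨ (z ∈ l ∧ |x - z.1| + |y - z.2| ≤ beers * 50)) := by
  induction l with
  | nil => intro q v z; simp [pvBfsStep]
  | cons c t ih =>
    intro q v z
    simp only [pvBfsStep, List.foldl_cons] at *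
    split_ifs with h
    · rw [ih]
      simp only [PySem.Set.mem_add, List.mem_cons]
      constructor
      · rintro ((hz | rfl) | hz)
        · exact Or.inl hz
        · exact Or.inr ⟨Or.inl rfl, h.2⟩
        · exact Or.inr ⟨Or.inr hz.1, hz.2⟩
      · rintro (hz | ⟨(rfl | hz), hnear⟩)
        · exact Or.inl (Or.inl hz)
        · exact Or.inl (Or.inr rfl)
        · exact Or.inr ⟨hz, hnear⟩
    · rw [ih]
      simp only [List.mem_cons]
      constructor
      · rintro (hz | hz)
        · exact Or.inl hz
        · exact Or.inr ⟨Or.inr hz.1, hz.2⟩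
      · rintro (hz | ⟨(rfl | hz), hnear⟩)
        · exact Or.inl hz
        · rcases not_and_or.mp h with h' | h'
          · exact Or.inl (not_not.mp h')
          · exact absurd hnear h'
        · exact Or.inr ⟨hz, hnear⟩

lemma step_mem_fst (x y beers : Int) (l : List (Int × Int)) :
    ∀ (q : List (Int × Int × Int)) (v : PySem.Set (Int × Int)) (e : Int × Int × Int),
      e ∈ (pvBfsStep x y beers l (q, v)).1 →
      e ∈ q ∨ (e.2.2 = 20 ∧ (e.1, e.2.1) ∈ l ∧ |x - e.1| + |y - e.2.1| ≤ beers * 50) := by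
  induction l with
  | nil => intro q v e he; simp [pvBfsStep] at he; exact Or.inl he
  | cons c t ih =>
    intro q v e he
    simp only [pvBfsStep, List.foldl_cons] at he ih
    split_ifs at he with h
    · rcases ih _ _ _ he with hq | hnew
      · rcases List.mem_append.mp hq with hq | hq
        · exact Or.inl hq
        · simp at hq
          subst hq
          exact Or.inr ⟨rfl, by simp, by simpa using h.2⟩
      · exact Or.inr ⟨hnew.1, by simp [hnew.2.1], hnew.2.2⟩
    · rcases ih _ _ _ he with hq | hnew
      · exact Or.inl hq
      · exact Or.inr ⟨hnew.1, by simp [hnew.2.1], hnew.2.2⟩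

lemma step_q_mono (x y beers : Int) (l : List (Int × Int)) :
    ∀ (q : List (Int × Int × Int)) (v : PySem.Set (Int × Int)) (e : Int × Int × Int),
      e ∈ q → e ∈ (pvBfsStep x y beers l (q, v)).1 := by
  induction l with
  | nil => intro q v e he; simpa [pvBfsStep] using he
  | cons c t ih =>
    intro q v e he
    simp only [pvBfsStep, List.foldl_cons] at *
    split_ifs with h
    · exact ih _ _ _ (by simp [he])
    · exact ih _ _ _ he

lemma step_sync (x y beers : Int) (l : List (Int × Int)) :
    ∀ (q : List (Int × Int × Int)) (v : PySem.Set (Int × Int)) (z : Int × Int),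
      z ∈ (pvBfsStep x y beers l (q, v)).2 →
      z ∈ v ∨ ∃ e ∈ (pvBfsStep x y beers l (q, v)).1, (e.1, e.2.1) = z := by
  induction l with
  | nil => intro q v z hz; simp [pvBfsStep] at hz; exact Or.inl hz
  | cons c t ih =>
    intro q v z hz
    simp only [pvBfsStep, List.foldl_cons] at *
    split_ifs at hz ⊢ with h
    · rcases ih _ _ _ hz with hv | he
      · rcases (PySem.Set.mem_add v c z).mp hv with hv | rfl
        · exact Or.inl hv
        · refine Or.inr ⟨(z.1, z.2, 20), ?_, rfl⟩
          have hq := step_q_mono x y beers t (q ++ [(z.1, z.2, 20)]) (v.add z) (z.1, z.2, 20) (by simp)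
          simpa only [pvBfsStep] using hq
      · exact Or.inr he
    · rcases ih _ _ _ hz with hv | he
      · exact Or.inl hv
      · exact Or.inr he

lemma step_qv (x y beers : Int) (l : List (Int × Int)) :
    ∀ (q : List (Int × Int × Int)) (v : PySem.Set (Int × Int)),
      (∀ e ∈ q, (e.1, e.2.1) ∈ v) →
      ∀ e ∈ (pvBfsStep x y beers l (q, v)).1, (e.1, e.2.1) ∈ (pvBfsStep x y beers l (q, v)).2 := by
  induction l with
  | nil => intro q v hqv e he; simp only [pvBfsStep, List.foldl_nil] at he ⊢; exact hqv e he
  | cons c t ih =>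
    intro q v hqv e he
    simp only [pvBfsStep, List.foldl_cons] at *
    split_ifs at he ⊢ with h
    · refine ih _ _ ?_ e he
      intro e' he'
      rcases List.mem_append.mp he' with he' | he'
      · exact (PySem.Set.mem_add v c _).mpr (Or.inl (hqv e' he'))
      · simp at he'
        subst he'
        exact (PySem.Set.mem_add v c _).mpr (Or.inr rfl)
    · exact ih _ _ hqv e he

-- visited sets stay closed supersets of the reachable set
lemma reach_subset (cs : List (Int × Int)) (home : Int × Int) (v : PySem.Set (Int × Int))
    (hhome : home ∈ v)
    (hclosed : ∀ p ∈ v, ∀ c ∈ cs, |p.1 - c.1| + |p.2 - c.2| ≤ 1000 → c ∈ v) :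
    ∀ p, Relation.ReflTransGen (pvStep cs) home p → p ∈ v := by
  intro p hp
  induction hp with
  | refl => exact hhome
  | tail _ hstep ih => exact hclosed _ ih _ hstep.1 hstep.2

-- ---- A-side: BFS computes pvAHappy ----
lemma bfs_happy_iff (cs : List (Int × Int)) (fx fy : Int) (home : Int × Int)
    (q : List (Int × Int × Int)) (v : PySem.Set (Int × Int))
    (hq20 : ∀ e ∈ q, e.2.2 = 20)
    (hqv : ∀ e ∈ q, (e.1, e.2.1) ∈ v)
    (hsound : ∀ p ∈ v, Relation.ReflTransGen (pvStep cs) home p)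
    (hhard : ∀ p ∈ v, (∀ e ∈ q, (e.1, e.2.1) ≠ p) →
        ¬ (|p.1 - fx| + |p.2 - fy| ≤ 1000) ∧ ∀ c ∈ cs, |p.1 - c.1| + |p.2 - c.2| ≤ 1000 → c ∈ v)
    (hhome : home ∈ v) :
    (pvBfsLoop cs fx fy q v = "happy" ↔ pvAHappy cs home (fx, fy)) := by
  induction q, v using pvBfsLoop.induct cs fx fy with
  | case1 v =>
    simp only [pvBfsLoop]
    constructor
    · intro hcontra; exact absurd hcontra (by decide)
    · rintro ⟨p, hp, hnear⟩
      have hclosed : ∀ p ∈ v, ∀ c ∈ cs, |p.1 - c.1| + |p.2 - c.2| ≤ 1000 → c ∈ v :=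
        fun p hpv c hc hn => (hhard p hpv (by simp)).2 c hc hn
      have hpv : p ∈ v := reach_subset cs home v hhome hclosed p hp
      exact absurd hnear (hhard p hpv (by simp)).1
  | case2 v x y beers rest h =>
    have hb : beers = 20 := hq20 (x, y, beers) (by simp)
    have hreach : Relation.ReflTransGen (pvStep cs) home (x, y) :=
      hsound _ (hqv (x, y, beers) (by simp))
    have hA : pvAHappy cs home (fx, fy) := by
      refine ⟨(x, y), hreach, ?_⟩
      rw [hb] at h; simpa using h
    simp only [pvBfsLoop, if_pos h]
    exact ⟨fun _ => hA, fun _ => trivial⟩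
  | case3 v x y beers rest h st ih =>
    have hb : beers = 20 := hq20 (x, y, beers) (by simp)
    have hvmono : ∀ z ∈ v, z ∈ st.2 :=
      fun z hz => (step_mem_snd x y beers cs rest v z).mpr (Or.inl hz)
    have h20' : ∀ e ∈ st.1, e.2.2 = 20 := by
      intro e he
      rcases step_mem_fst x y beers cs rest v e he with hq | hnew
      · exact hq20 e (by simp [hq])
      · exact hnew.1
    have hqv' : ∀ e ∈ st.1, (e.1, e.2.1) ∈ st.2 :=
      step_qv x y beers cs rest v (fun e he => hqv e (by simp [he]))
    have hsound' : ∀ p ∈ st.2, Relation.ReflTransGen (pvStep cs) home p := by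
      intro p hp
      rcases (step_mem_snd x y beers cs rest v p).mp hp with hv | ⟨hpcs, hnear⟩
      · exact hsound p hv
      · have hx : (x, y) ∈ v := hqv (x, y, beers) (by simp)
        refine Relation.ReflTransGen.tail (hsound _ hx) ⟨hpcs, ?_⟩
        rw [hb] at hnear; simpa using hnear
    have hhard' : ∀ p ∈ st.2, (∀ e ∈ st.1, (e.1, e.2.1) ≠ p) →
        ¬ (|p.1 - fx| + |p.2 - fy| ≤ 1000) ∧
          ∀ c ∈ cs, |p.1 - c.1| + |p.2 - c.2| ≤ 1000 → c ∈ st.2 := by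
      intro p hp hnq
      have hpv : p ∈ v := by
        rcases step_sync x y beers cs rest v p hp with hv | ⟨e, he, hec⟩
        · exact hv
        · exact absurd hec (hnq e he)
      by_cases hpx : p = (x, y)
      · subst hpx
        constructor
        · rw [hb] at h; simpa using h
        · intro c hc hnear
          refine (step_mem_snd x y beers cs rest v c).mpr (Or.inr ⟨hc, ?_⟩)
          rw [hb]; simpa using hnear
      · have hnq0 : ∀ e ∈ (x, y, beers) :: rest, (e.1, e.2.1) ≠ p := by
          intro e he
          rcases List.mem_cons.mp he with rfl | he
          · intro hh; exact hpx (by simpa using hh.symm)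
          · exact fun hh => hnq e (step_q_mono x y beers cs rest v e he) hh
        obtain ⟨hnf, hcl⟩ := hhard p hpv hnq0
        exact ⟨hnf, fun c hc hn => hvmono c (hcl c hc hn)⟩
    have hhome' : home ∈ st.2 := hvmono home hhome
    have := ih h20' hqv' hsound' hhard' hhome'
    simp only [pvBfsLoop, if_neg h]
    exact this

lemma A_happy_iff (hx hy : Int) (cs : List (Int × Int)) (fx fy : Int) :
    (can_reach_festival hx hy cs fx fy = "happy" ↔ pvAHappy cs (hx, hy) (fx, fy)) := by
  unfold can_reach_festival
  apply bfs_happy_iff cs fx fy (hx, hy)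
  · intro e he; simp at he; simp [he]
  · intro e he; simp at he; simp [he, PySem.Set.mem_ofList]
  · intro p hp
    have : p = (hx, hy) := by simpa [PySem.Set.mem_ofList] using hp
    subst this; exact Relation.ReflTransGen.refl
  · intro p hp hq
    have hpeq : p = (hx, hy) := by simpa [PySem.Set.mem_ofList] using hp
    exact absurd hpeq.symm (by simpa using hq (hx, hy, 20) (by simp))
  · simp [PySem.Set.mem_ofList]

lemma bfs_cases (cs : List (Int × Int)) (fx fy : Int) :
    ∀ (q : List (Int × Int × Int)) (v : PySem.Set (Int × Int)),
      pvBfsLoop cs fx fy q v = "happy" ∨ pvBfsLoop cs fx fy q v = "sad" := by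
  intro q v
  induction q, v using pvBfsLoop.induct cs fx fy with
  | case1 v => simp [pvBfsLoop]
  | case2 v x y beers rest h => simp [pvBfsLoop, if_pos h]
  | case3 v x y beers rest h st ih =>
    simp only [pvBfsLoop, if_neg h]
    exact ih

lemma A_cases (hx hy : Int) (cs : List (Int × Int)) (fx fy : Int) :
    can_reach_festival hx hy cs fx fy = "happy" ∨ can_reach_festival hx hy cs fx fy = "sad" := by
  unfold can_reach_festival
  exact bfs_cases cs fx fy _ _

-- ---- bridge: pvAHappy ↔ pvConn ----
lemma pvEdge_symm (L : List (Int × Int)) : Symmetric (pvEdge L) := by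
  rintro a b ⟨ha, hb, hd⟩
  exact ⟨hb, ha, by rw [abs_sub_comm b.1 a.1, abs_sub_comm b.2 a.2]; exact hd⟩

lemma conn_of_reach (cs : List (Int × Int)) (home : Int × Int) (L : List (Int × Int))
    (hcs : ∀ c ∈ cs, c ∈ L) (hhome : home ∈ L) :
    ∀ p, Relation.ReflTransGen (pvStep cs) home p → p ∈ L ∧ pvConn L home p := by
  intro p hp
  induction hp with
  | refl => exact ⟨hhome, Relation.EqvGen.refl home⟩
  | tail hsteps hstep ih =>
    refine ⟨hcs _ hstep.1, Relation.EqvGen.trans _ _ _ ih.2 ?_⟩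
    exact Relation.EqvGen.rel _ _ ⟨ih.1, hcs _ hstep.1, hstep.2⟩

lemma reach_or_happy_of_rtg (hx hy : Int) (cs : List (Int × Int)) (fx fy : Int) :
    ∀ p, Relation.ReflTransGen (pvEdge (((hx, hy) :: cs) ++ [(fx, fy)])) (hx, hy) p →
      Relation.ReflTransGen (pvStep cs) (hx, hy) p ∨ pvAHappy cs (hx, hy) (fx, fy) := by
  intro p hp
  induction hp with
  | refl => exact Or.inl Relation.ReflTransGen.refl
  | @tail b c hsteps hstep ih =>
    rcases ih with hreach | hA
    · by_cases hc : c = (fx, fy)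
      · subst hc
        exact Or.inr ⟨b, hreach, hstep.2.2⟩
      · have hcL : c ∈ ((hx, hy) :: cs) := by
          rcases List.mem_append.mp hstep.2.1 with hm | hm
          · exact hm
          · exact absurd (by simpa using hm) hc
        rcases List.mem_cons.mp hcL with rfl | hccs
        · exact Or.inl Relation.ReflTransGen.refl
        · exact Or.inl (Relation.ReflTransGen.tail hreach ⟨hccs, hstep.2.2⟩)
    · exact Or.inr hA

lemma AHappy_iff_Conn (hx hy : Int) (cs : List (Int × Int)) (fx fy : Int) :
    (pvAHappy cs (hx, hy) (fx, fy) ↔ pvConn (((hx, hy) :: cs) ++ [(fx, fy)]) (hx, hy) (fx, fy)) := by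
  constructor
  · rintro ⟨p, hp, hnear⟩
    obtain ⟨hpL, hconn⟩ := conn_of_reach cs (hx, hy) (((hx, hy) :: cs) ++ [(fx, fy)])
      (fun c hc => by simp [hc]) (by simp) p hp
    refine Relation.EqvGen.trans _ _ _ hconn (Relation.EqvGen.rel _ _ ⟨hpL, by simp, hnear⟩)
  · intro hconn
    have hsym := pvEdge_symm (((hx, hy) :: cs) ++ [(fx, fy)])
    have hequiv : Equivalence (Relation.ReflTransGen (pvEdge (((hx, hy) :: cs) ++ [(fx, fy)]))) :=
      ⟨fun _ => Relation.ReflTransGen.refl,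
       fun h => Relation.ReflTransGen.symmetric hsym h,
       fun h1 h2 => Relation.ReflTransGen.trans h1 h2⟩
    have hrtg : Relation.ReflTransGen (pvEdge (((hx, hy) :: cs) ++ [(fx, fy)])) (hx, hy) (fx, fy) := by
      have := Relation.EqvGen.mono (fun a b hab => Relation.ReflTransGen.single hab) hconn
      rwa [Equivalence.eqvGen_eq hequiv] at this
    rcases reach_or_happy_of_rtg hx hy cs fx fy (fx, fy) hrtg with hreach | hA
    · exact ⟨(fx, fy), hreach, by simp⟩
    · exact hA

-- ---- B-side: comp0 and relabel characterizations ----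
lemma comp0_get? (l : List (Int × Int)) :
    ∀ (d : PySem.Dict (Int × Int) (Int × Int)) (q : Int × Int),
      (l.foldl (fun d p => if d.contains p then d else d.insert p p) d).get? q
        = if (d.get? q).isSome = true then d.get? q else (if q ∈ l then some q else none) := by
  induction l with
  | nil =>
    intro d q
    cases h : d.get? q <;> simp [h]
  | cons p t ih =>
    intro d q
    simp only [List.foldl_cons]
    by_cases hc : d.contains p = true
    · rw [if_pos hc, ih d q]
      by_cases hq : (d.get? q).isSome = true
      · simp [hq]
      · rw [if_neg hq, if_neg hq]
        by_cases hqp : q = p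
        · subst hqp
          rw [PySem.Dict.contains_eq_isSome_get?] at hc
          exact absurd hc hq
        · simp [List.mem_cons, hqp]
    · rw [if_neg hc, ih (d.insert p p) q]
      rw [PySem.Dict.get?_insert]
      by_cases hqp : q = p
      · subst hqp
        rw [PySem.Dict.contains_eq_isSome_get?] at hc
        simp [hc] at *
      · rw [if_neg hqp]
        by_cases hq : (d.get? q).isSome = true
        · simp [hq]
        · simp [hq, List.mem_cons, hqp]

lemma relabel_get? (c : PySem.Dict (Int × Int) (Int × Int)) (ca cb q : Int × Int) :
    (pvRelabel c ca cb).get? q = (c.get? q).map (fun v => if v = cb then ca else v) := by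
  obtain ⟨items⟩ := c
  induction items with
  | nil => rfl
  | cons kv rest ih =>
    obtain ⟨k, v⟩ := kv
    show (PySem.Dict.mk (((k, v) :: rest).map (fun pc => (pc.1, if pc.2 = cb then ca else pc.2)))).get? q = _
    simp only [List.map_cons, PySem.Dict.get?_mk_cons]
    by_cases hkq : (k == q) = true
    · simp [hkq]
    · simp only [hkq, Bool.false_eq_true, if_false]
      exact ih

-- invariants of the union loop
def pvKeysAll (L : List (Int × Int)) (c : PySem.Dict (Int × Int) (Int × Int)) : Prop :=
  ∀ q : Int × Int, ((c.get? q).isSome = true ↔ q ∈ L)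

def pvSound (L : List (Int × Int)) (c : PySem.Dict (Int × Int) (Int × Int)) : Prop :=
  ∀ p q : Int × Int, p ∈ L → q ∈ L → c.get? p = c.get? q → pvConn L p q

lemma get?_eq_some_getD (L : List (Int × Int)) (c : PySem.Dict (Int × Int) (Int × Int))
    (hK : pvKeysAll L c) (a : Int × Int) (ha : a ∈ L) : c.get? a = some (c.getD a a) := by
  obtain ⟨v, hv⟩ := Option.isSome_iff_exists.mp ((hK a).mpr ha)
  rw [hv, PySem.Dict.getD_eq_get?_getD, hv]
  rfl

lemma unionStep_K (L : List (Int × Int)) (a b : Int × Int) (c : PySem.Dict (Int × Int) (Int × Int))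
    (hK : pvKeysAll L c) : pvKeysAll L (pvUnionStep a b c) := by
  unfold pvUnionStep
  split_ifs with h
  · intro q; rw [relabel_get?, Option.isSome_map]; exact hK q
  · exact hK

lemma unionStep_persist (a b : Int × Int) (c : PySem.Dict (Int × Int) (Int × Int)) (p q : Int × Int)
    (h : c.get? p = c.get? q) : (pvUnionStep a b c).get? p = (pvUnionStep a b c).get? q := by
  unfold pvUnionStep
  split_ifs with hif
  · rw [relabel_get?, relabel_get?, h]
  · exact h

lemma unionStep_sound (L : List (Int × Int)) (a b : Int × Int)
    (c : PySem.Dict (Int × Int) (Int × Int)) (ha : a ∈ L) (hb : b ∈ L)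
    (hK : pvKeysAll L c) (hS : pvSound L c) : pvSound L (pvUnionStep a b c) := by
  unfold pvUnionStep
  split_ifs with h
  · have hga := get?_eq_some_getD L c hK a ha
    have hgb := get?_eq_some_getD L c hK b hb
    intro p q hp hq heq
    rw [relabel_get?, relabel_get?] at heq
    obtain ⟨vp, hvp⟩ := Option.isSome_iff_exists.mp ((hK p).mpr hp)
    obtain ⟨vq, hvq⟩ := Option.isSome_iff_exists.mp ((hK q).mpr hq)
    rw [hvp, hvq] at heq
    simp only [Option.map_some, Option.some.injEq] at heq
    have hedge : pvConn L a b := Relation.EqvGen.rel _ _ ⟨ha, hb, h.1⟩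
    by_cases hvpcb : vp = c.getD b b <;> by_cases hvqcb : vq = c.getD b b
    · exact hS p q hp hq (by rw [hvp, hvq, hvpcb, hvqcb])
    · -- vp = cb, vq ≠ cb → vq = ca
      rw [if_pos hvpcb, if_neg hvqcb] at heq
      have hpb : pvConn L p b := hS p b hp hb (by rw [hvp, hvpcb, hgb])
      have hqa : pvConn L q a := hS q a hq ha (by rw [hvq, ← heq, hga])
      exact Relation.EqvGen.trans _ _ _ hpb (Relation.EqvGen.trans _ _ _
        (Relation.EqvGen.symm _ _ hedge) (Relation.EqvGen.symm _ _ hqa))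
    · rw [if_neg hvpcb, if_pos hvqcb] at heq
      have hqb : pvConn L q b := hS q b hq hb (by rw [hvq, hvqcb, hgb])
      have hpa : pvConn L p a := hS p a hp ha (by rw [hvp, heq, hga])
      exact Relation.EqvGen.trans _ _ _ hpa (Relation.EqvGen.trans _ _ _
        hedge (Relation.EqvGen.symm _ _ hqb))
    · rw [if_neg hvpcb, if_neg hvqcb] at heq
      exact hS p q hp hq (by rw [hvp, hvq, heq])
  · exact hS

lemma unionStep_merges (L : List (Int × Int)) (a b : Int × Int)
    (c : PySem.Dict (Int × Int) (Int × Int)) (ha : a ∈ L) (hb : b ∈ L)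
    (hK : pvKeysAll L c) (hnear : |a.1 - b.1| + |a.2 - b.2| ≤ 1000) :
    (pvUnionStep a b c).get? a = (pvUnionStep a b c).get? b := by
  have hga := get?_eq_some_getD L c hK a ha
  have hgb := get?_eq_some_getD L c hK b hb
  unfold pvUnionStep
  split_ifs with h
  · rw [relabel_get?, relabel_get?, hga, hgb]
    simp [h.2]
  · have heq : c.getD a a = c.getD b b := by
      by_contra hne
      exact h ⟨hnear, hne⟩
    rw [hga, hgb, heq]
-- the inner 'for b in pts' fold
lemma innerfold_K (L : List (Int × Int)) (a : Int × Int) (l : List (Int × Int)) :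
    ∀ c, pvKeysAll L c → pvKeysAll L (l.foldl (fun c b => pvUnionStep a b c) c) := by
  induction l with
  | nil => intro c hK; exact hK
  | cons b t ih => intro c hK; exact ih _ (unionStep_K L a b c hK)

lemma innerfold_persist (a : Int × Int) (l : List (Int × Int)) :
    ∀ c (p q : Int × Int), c.get? p = c.get? q →
      (l.foldl (fun c b => pvUnionStep a b c) c).get? p = (l.foldl (fun c b => pvUnionStep a b c) c).get? q := by
  induction l with
  | nil => intro c p q h; exact h
  | cons b t ih => intro c p q h; exact ih _ _ _ (unionStep_persist a b c p q h)

lemma innerfold_sound (L : List (Int × Int)) (a : Int × Int) (l : List (Int × Int))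
    (ha : a ∈ L) (hl : ∀ b ∈ l, b ∈ L) :
    ∀ c, pvKeysAll L c → pvSound L c → pvSound L (l.foldl (fun c b => pvUnionStep a b c) c) := by
  induction l with
  | nil => intro c _ hS; exact hS
  | cons b t ih =>
    intro c hK hS
    exact ih (fun b hb => hl b (by simp [hb])) _ (unionStep_K L a b c hK)
      (unionStep_sound L a b c ha (hl b (by simp)) hK hS)

lemma innerfold_merges (L : List (Int × Int)) (a : Int × Int) (l : List (Int × Int))
    (ha : a ∈ L) (hl : ∀ b ∈ l, b ∈ L) :
    ∀ c, pvKeysAll L c → ∀ b ∈ l, |a.1 - b.1| + |a.2 - b.2| ≤ 1000 →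
      (l.foldl (fun c b => pvUnionStep a b c) c).get? a = (l.foldl (fun c b => pvUnionStep a b c) c).get? b := by
  induction l with
  | nil => intro c _ b hb; simp at hb
  | cons b0 t ih =>
    intro c hK b hb hnear
    rcases List.mem_cons.mp hb with rfl | hbt
    · simp only [List.foldl_cons]
      exact innerfold_persist a t _ _ _
        (unionStep_merges L a b c ha (hl b (by simp)) hK hnear)
    · simp only [List.foldl_cons]
      exact ih (fun b hb => hl b (by simp [hb])) _ (unionStep_K L a b0 c hK) b hbt hnear

-- the outer 'for a in pts' fold
lemma outerfold_K (L : List (Int × Int)) (pts : List (Int × Int)) (l : List (Int × Int)) :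
    ∀ c, pvKeysAll L c →
      pvKeysAll L (l.foldl (fun c a => pts.foldl (fun c b => pvUnionStep a b c) c) c) := by
  induction l with
  | nil => intro c hK; exact hK
  | cons a t ih => intro c hK; exact ih _ (innerfold_K L a pts c hK)

lemma outerfold_persist (pts : List (Int × Int)) (l : List (Int × Int)) :
    ∀ c (p q : Int × Int), c.get? p = c.get? q →
      (l.foldl (fun c a => pts.foldl (fun c b => pvUnionStep a b c) c) c).get? p
        = (l.foldl (fun c a => pts.foldl (fun c b => pvUnionStep a b c) c) c).get? q := by
  induction l with
  | nil => intro c p q h; exact h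
  | cons a t ih => intro c p q h; exact ih _ _ _ (innerfold_persist a pts c p q h)

lemma outerfold_sound (L : List (Int × Int)) (pts : List (Int × Int)) (l : List (Int × Int))
    (hpts : ∀ b ∈ pts, b ∈ L) (hl : ∀ a ∈ l, a ∈ L) :
    ∀ c, pvKeysAll L c → pvSound L c →
      pvSound L (l.foldl (fun c a => pts.foldl (fun c b => pvUnionStep a b c) c) c) := by
  induction l with
  | nil => intro c _ hS; exact hS
  | cons a t ih =>
    intro c hK hS
    exact ih (fun a ha => hl a (by simp [ha])) _ (innerfold_K L a pts c hK)
      (innerfold_sound L a pts (hl a (by simp)) hpts c hK hS)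

lemma outerfold_merges (L : List (Int × Int)) (pts : List (Int × Int)) (l : List (Int × Int))
    (hpts : ∀ b ∈ pts, b ∈ L) (hl : ∀ a ∈ l, a ∈ L) :
    ∀ c, pvKeysAll L c → ∀ a ∈ l, ∀ b ∈ pts, |a.1 - b.1| + |a.2 - b.2| ≤ 1000 →
      (l.foldl (fun c a => pts.foldl (fun c b => pvUnionStep a b c) c) c).get? a
        = (l.foldl (fun c a => pts.foldl (fun c b => pvUnionStep a b c) c) c).get? b := by
  induction l with
  | nil => intro c _ a ha; simp at ha
  | cons a0 t ih =>
    intro c hK a ha b hb hnear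
    rcases List.mem_cons.mp ha with rfl | hat
    · simp only [List.foldl_cons]
      exact outerfold_persist pts t _ _ _
        (innerfold_merges L a pts (hl a (by simp)) hpts c hK b hb hnear)
    · simp only [List.foldl_cons]
      exact ih (fun a ha => hl a (by simp [ha])) _ (innerfold_K L a0 pts c hK) a hat b hb hnear

def pvNodes (hx hy : Int) (cs : List (Int × Int)) (fx fy : Int) : List (Int × Int) :=
  ((hx, hy) :: cs) ++ [(fx, fy)]

def pvComp0 (hx hy : Int) (cs : List (Int × Int)) (fx fy : Int) : PySem.Dict (Int × Int) (Int × Int) :=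
  (pvNodes hx hy cs fx fy).foldl (fun d p => if d.contains p then d else d.insert p p) PySem.Dict.empty

def pvComp (hx hy : Int) (cs : List (Int × Int)) (fx fy : Int) : PySem.Dict (Int × Int) (Int × Int) :=
  (pvComp0 hx hy cs fx fy).keys.foldl
    (fun c a => (pvComp0 hx hy cs fx fy).keys.foldl (fun c b => pvUnionStep a b c) c)
    (pvComp0 hx hy cs fx fy)

lemma alt_eq (hx hy : Int) (cs : List (Int × Int)) (fx fy : Int) :
    can_reach_festival_alt hx hy cs fx fy
      = if (pvComp hx hy cs fx fy).getD (hx, hy) (hx, hy)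
          = (pvComp hx hy cs fx fy).getD (fx, fy) (fx, fy) then "happy" else "sad" := rfl

lemma comp0_get?_mem (hx hy : Int) (cs : List (Int × Int)) (fx fy : Int) :
    ∀ q ∈ pvNodes hx hy cs fx fy, (pvComp0 hx hy cs fx fy).get? q = some q := by
  intro q hq
  unfold pvComp0
  rw [comp0_get?]
  simp only [PySem.Dict.get?_empty, Option.isSome_none, Bool.false_eq_true, if_false]
  rw [if_pos hq]

lemma comp0_K (hx hy : Int) (cs : List (Int × Int)) (fx fy : Int) :
    pvKeysAll (pvNodes hx hy cs fx fy) (pvComp0 hx hy cs fx fy) := by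
  intro q
  unfold pvComp0
  rw [comp0_get?]
  simp only [PySem.Dict.get?_empty, Option.isSome_none, Bool.false_eq_true, if_false]
  by_cases hq : q ∈ pvNodes hx hy cs fx fy
  · rw [if_pos hq]; simp [hq]
  · rw [if_neg hq]; simpa using hq

lemma comp0_S (hx hy : Int) (cs : List (Int × Int)) (fx fy : Int) :
    pvSound (pvNodes hx hy cs fx fy) (pvComp0 hx hy cs fx fy) := by
  intro p q hp hq heq
  rw [comp0_get?_mem hx hy cs fx fy p hp, comp0_get?_mem hx hy cs fx fy q hq] at heq
  obtain rfl : p = q := by simpa using heq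
  exact Relation.EqvGen.refl p

lemma pts_sub (hx hy : Int) (cs : List (Int × Int)) (fx fy : Int) :
    ∀ q ∈ (pvComp0 hx hy cs fx fy).keys, q ∈ pvNodes hx hy cs fx fy := by
  intro q hq
  refine (comp0_K hx hy cs fx fy q).mp ?_
  rw [← Option.ne_none_iff_isSome]
  exact (not_iff_not.mpr (PySem.Dict.get?_eq_none_iff_not_mem_keys _ q)).mpr (not_not.mpr hq)

lemma sub_pts (hx hy : Int) (cs : List (Int × Int)) (fx fy : Int) :
    ∀ q ∈ pvNodes hx hy cs fx fy, q ∈ (pvComp0 hx hy cs fx fy).keys := by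
  intro q hq
  have h := comp0_get?_mem hx hy cs fx fy q hq
  by_contra hnk
  rw [(PySem.Dict.get?_eq_none_iff_not_mem_keys _ q).mpr hnk] at h
  simp at h

lemma comp_K (hx hy : Int) (cs : List (Int × Int)) (fx fy : Int) :
    pvKeysAll (pvNodes hx hy cs fx fy) (pvComp hx hy cs fx fy) :=
  outerfold_K _ _ _ _ (comp0_K hx hy cs fx fy)

lemma comp_sound (hx hy : Int) (cs : List (Int × Int)) (fx fy : Int) :
    pvSound (pvNodes hx hy cs fx fy) (pvComp hx hy cs fx fy) :=
  outerfold_sound _ _ _ (pts_sub hx hy cs fx fy) (pts_sub hx hy cs fx fy) _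
    (comp0_K hx hy cs fx fy) (comp0_S hx hy cs fx fy)

lemma comp_complete (hx hy : Int) (cs : List (Int × Int)) (fx fy : Int) :
    ∀ p q : Int × Int, pvConn (pvNodes hx hy cs fx fy) p q →
      (pvComp hx hy cs fx fy).get? p = (pvComp hx hy cs fx fy).get? q := by
  intro p q h
  induction h with
  | rel a b hab =>
    exact outerfold_merges _ _ _ (pts_sub hx hy cs fx fy) (pts_sub hx hy cs fx fy) _
      (comp0_K hx hy cs fx fy) a (sub_pts hx hy cs fx fy _ hab.1)
      b (sub_pts hx hy cs fx fy _ hab.2.1) hab.2.2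
  | refl => rfl
  | symm _ _ _ ih => exact ih.symm
  | trans _ _ _ _ _ ih1 ih2 => exact ih1.trans ih2

lemma B_happy_iff (hx hy : Int) (cs : List (Int × Int)) (fx fy : Int) :
    (can_reach_festival_alt hx hy cs fx fy = "happy" ↔ pvConn (((hx, hy) :: cs) ++ [(fx, fy)]) (hx, hy) (fx, fy)) := by
  have hhomeL : ((hx, hy) : Int × Int) ∈ pvNodes hx hy cs fx fy := by simp [pvNodes]
  have hfestL : ((fx, fy) : Int × Int) ∈ pvNodes hx hy cs fx fy := by simp [pvNodes]
  have hgh := get?_eq_some_getD _ _ (comp_K hx hy cs fx fy) (hx, hy) hhomeL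
  have hgf := get?_eq_some_getD _ _ (comp_K hx hy cs fx fy) (fx, fy) hfestL
  rw [alt_eq]
  show _ ↔ pvConn (pvNodes hx hy cs fx fy) (hx, hy) (fx, fy)
  split_ifs with hgd
  · refine ⟨fun _ => ?_, fun _ => rfl⟩
    exact comp_sound hx hy cs fx fy (hx, hy) (fx, fy) hhomeL hfestL (by rw [hgh, hgf, hgd])
  · constructor
    · intro h'; exact absurd h' (by decide)
    · intro hconn
      have h := comp_complete hx hy cs fx fy (hx, hy) (fx, fy) hconn
      rw [hgh, hgf] at h
      exact absurd (by simpa using h) hgd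

lemma B_cases (hx hy : Int) (cs : List (Int × Int)) (fx fy : Int) :
    can_reach_festival_alt hx hy cs fx fy = "happy" ∨ can_reach_festival_alt hx hy cs fx fy = "sad" := by
  rw [alt_eq]
  split_ifs <;> simp

-- ===== VERDICT (by name: the statement is the Claim_ definition above) =====
theorem can_reach_festival_spec : Claim_equal_can_reach_festival := by
  intro hx hy cs fx fy _
  unfold Spec_can_reach_festival
  have hiff : (can_reach_festival hx hy cs fx fy = "happy" ↔ can_reach_festival_alt hx hy cs fx fy = "happy") :=
    (A_happy_iff hx hy cs fx fy).trans ((AHappy_iff_Conn hx hy cs fx fy).trans (B_happy_iff hx hy cs fx fy).symm)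
  rcases A_cases hx hy cs fx fy with hA | hA <;> rcases B_cases hx hy cs fx fy with hB | hB <;>
    simp_all
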